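-- pv_equiv track=rewrite | github.com/protoplm/sc2_discord_larva_parser | parse_larva.py | calculate_idle_larva_counts
-- ===== SOURCE A (Python) =====
-- def calculate_idle_larva_counts(born_dict, died_dict, start_second, end_second, idle_threshold):
--     idle_larva_count_per_second = {}
--     max_time = max(died_dict.values(), default=0)
--
--     for current_time in range(start_second, int(min(end_second, max_time)) + 1):
--         idle_larva_count = 0
--         for unit_id, born_time in born_dict.items():
--             died_time = died_dict.get(unit_id, float('inf'))
--             if born_time + idle_threshold <= current_time <= died_time:
--                 idle_larva_count += 1
--         idle_larva_count_per_second[current_time] = idle_larva_count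
--
--     return idle_larva_count_per_second
-- ===== SOURCE B (Python) =====
-- def calculate_idle_larva_counts(born_dict, died_dict, start_second, end_second, idle_threshold):
--     max_time = max(died_dict.values(), default=0)
--     lo = start_second
--     hi = min(end_second, max_time)
--     if lo > hi:
--         return {}
--     n = hi - lo + 1
--     delta = [0] * (n + 1)
--     for unit_id, born_time in born_dict.items():
--         s = born_time + idle_threshold
--         e = died_dict.get(unit_id)  # None = never dies
--         a = max(s, lo)
--         b = hi if e is None else min(e, hi)
--         if a <= b:
--             delta[a - lo] += 1
--             delta[b - lo + 1] -= 1
--     result = {}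
--     c = 0
--     for i in range(n):
--         c += delta[i]
--         result[lo + i] = c
--     return result
-- ===== Notes on version B (the rewrite author's own statement) =====
-- stated objective: alternative
-- what changed: Replaces the per-second rescan of all larvae (a nested loop over seconds and units) with a difference array: each unit's clamped idle interval contributes +1/-1 events and a single prefix-sum pass over the second range yields all counts.
import Mathlib
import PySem

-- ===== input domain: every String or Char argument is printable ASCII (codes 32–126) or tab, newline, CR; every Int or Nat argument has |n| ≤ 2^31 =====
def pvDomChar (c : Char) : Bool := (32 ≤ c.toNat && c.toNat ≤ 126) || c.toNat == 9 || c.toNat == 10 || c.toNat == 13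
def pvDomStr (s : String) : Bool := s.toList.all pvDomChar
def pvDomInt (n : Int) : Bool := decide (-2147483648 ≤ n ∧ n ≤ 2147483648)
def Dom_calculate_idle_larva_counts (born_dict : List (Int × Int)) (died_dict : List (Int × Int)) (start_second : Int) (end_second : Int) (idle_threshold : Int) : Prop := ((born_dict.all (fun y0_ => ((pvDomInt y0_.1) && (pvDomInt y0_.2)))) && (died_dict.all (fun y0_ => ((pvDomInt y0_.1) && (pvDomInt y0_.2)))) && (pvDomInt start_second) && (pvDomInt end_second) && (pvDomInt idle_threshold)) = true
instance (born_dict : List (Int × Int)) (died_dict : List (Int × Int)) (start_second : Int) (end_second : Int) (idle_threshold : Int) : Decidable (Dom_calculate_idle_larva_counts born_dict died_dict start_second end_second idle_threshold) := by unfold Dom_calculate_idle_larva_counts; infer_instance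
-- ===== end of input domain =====

-- B replaces A's per-second rescan of all units with a difference-array + prefix-sum sweep
-- over the time range (an alternative algorithm; equivalence of return values is proved below).


-- ===== PORT A =====
def calculate_idle_larva_counts (born_dict : List (Int × Int)) (died_dict : List (Int × Int)) (start_second : Int) (end_second : Int) (idle_threshold : Int) : List (Int × Int) :=
  let bd := PySem.Dict.ofList born_dict
  let dd := PySem.Dict.ofList died_dict
  let max_time := PySem.List.maxD dd.values (fun v => v) 0
  let res := (PySem.List.pyRange start_second (min end_second max_time + 1) 1).foldl
    (fun (acc : PySem.Dict Int Int) current_time =>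
      let cnt := bd.items.foldl
        (fun (c : Int) p =>
          match dd.get? p.1 with
          | none   => if p.2 + idle_threshold ≤ current_time then c + 1 else c
          | some d => if p.2 + idle_threshold ≤ current_time ∧ current_time ≤ d then c + 1 else c)
        0
      acc.insert current_time cnt)
    PySem.Dict.empty
  res.items

-- ===== PORT B =====
-- delta[i] += v  (index always in range when B uses it)
def pvBump (d : List Int) (i : Nat) (v : Int) : List Int := d.set i (d.getD i 0 + v)

def calculate_idle_larva_counts_alt (born_dict : List (Int × Int)) (died_dict : List (Int × Int)) (start_second : Int) (end_second : Int) (idle_threshold : Int) : List (Int × Int) :=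
  let dd := PySem.Dict.ofList died_dict
  let max_time := PySem.List.maxD dd.values (fun v => v) 0
  let lo := start_second
  let hi := min end_second max_time
  if lo > hi then [] else
  let n := (hi - lo + 1).toNat
  let delta := (PySem.Dict.ofList born_dict).items.foldl
    (fun (d : List Int) p =>
      let s := p.2 + idle_threshold
      let a := max s lo
      let b := match dd.get? p.1 with | none => hi | some e => min e hi
      if a ≤ b then pvBump (pvBump d (a - lo).toNat 1) (b - lo + 1).toNat (-1) else d)
    (List.replicate (n + 1) 0)
  let st := (List.range n).foldl
    (fun (st : PySem.Dict Int Int × Int) i =>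
      let c := st.2 + delta.getD i 0
      (st.1.insert (lo + (i : Int)) c, c))
    (PySem.Dict.empty, 0)
  st.1.items

-- ===== PRECONDITION & SPEC =====
def Spec_calculate_idle_larva_counts (born_dict : List (Int × Int)) (died_dict : List (Int × Int)) (start_second : Int) (end_second : Int) (idle_threshold : Int) (out : List (Int × Int)) : Prop := out = calculate_idle_larva_counts_alt born_dict died_dict start_second end_second idle_threshold
instance (born_dict : List (Int × Int)) (died_dict : List (Int × Int)) (start_second : Int) (end_second : Int) (idle_threshold : Int) (out : List (Int × Int)) : Decidable (Spec_calculate_idle_larva_counts born_dict died_dict start_second end_second idle_threshold out) := by unfold Spec_calculate_idle_larva_counts; infer_instance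

-- ===== CLAIM (what is proved, stated in full; the proofs are below) =====
def Claim_equal_calculate_idle_larva_counts : Prop := ∀ (born_dict : List (Int × Int)) (died_dict : List (Int × Int)) (start_second : Int) (end_second : Int) (idle_threshold : Int), Dom_calculate_idle_larva_counts born_dict died_dict start_second end_second idle_threshold → Spec_calculate_idle_larva_counts born_dict died_dict start_second end_second idle_threshold (calculate_idle_larva_counts born_dict died_dict start_second end_second idle_threshold)

-- ===== LEMMAS AND PROOFS =====

-- A's inner counting loop, with explicit accumulator
def pvCnt (dd : PySem.Dict Int Int) (thr : Int) (units : List (Int × Int)) (t : Int) (c : Int) : Int :=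
  units.foldl
    (fun (c : Int) p =>
      match dd.get? p.1 with
      | none   => if p.2 + thr ≤ t then c + 1 else c
      | some d => if p.2 + thr ≤ t ∧ t ≤ d then c + 1 else c)
    c

-- B's per-unit delta update
def pvApply (dd : PySem.Dict Int Int) (thr lo hi : Int) (d : List Int) (p : Int × Int) : List Int :=
  let s := p.2 + thr
  let a := max s lo
  let b := match dd.get? p.1 with | none => hi | some e => min e hi
  if a ≤ b then pvBump (pvBump d (a - lo).toNat 1) (b - lo + 1).toNat (-1) else d

-- prefix sum of the first m cells of delta
def pvS (d : List Int) (m : Nat) : Int := ((List.range m).map (fun j => d.getD j 0)).sum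

theorem pvCnt_cons (dd : PySem.Dict Int Int) (thr : Int) (u : Int × Int) (us : List (Int × Int)) (t c : Int) :
    pvCnt dd thr (u :: us) t c =
      pvCnt dd thr us t
        (match dd.get? u.1 with
          | none   => if u.2 + thr ≤ t then c + 1 else c
          | some d => if u.2 + thr ≤ t ∧ t ≤ d then c + 1 else c) := rfl

theorem pvCnt_shift (dd : PySem.Dict Int Int) (thr : Int) (units : List (Int × Int)) (t : Int) (c : Int) :
    pvCnt dd thr units t c = c + pvCnt dd thr units t 0 := by
  induction units generalizing c with
  | nil => simp [pvCnt]
  | cons u us ih =>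
    simp only [pvCnt, List.foldl_cons] at *
    rcases h : dd.get? u.1 with _ | d <;> simp only [h] <;> split_ifs <;>
      first
        | (rw [ih (c + 1), ih (0 + 1)]; ring)
        | rw [ih c]

theorem pvS_succ (d : List Int) (m : Nat) : pvS d (m + 1) = pvS d m + d.getD m 0 := by
  simp [pvS, List.range_succ]

theorem pvS_bump (d : List Int) (j : Nat) (v : Int) (m : Nat) :
    pvS (pvBump d j v) m = pvS d m + (if j < m ∧ j < d.length then v else 0) := by
  induction m with
  | zero => simp [pvS]
  | succ m ih =>
    rw [pvS_succ, pvS_succ, ih]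
    have hget : (pvBump d j v).getD m 0 =
        if j = m ∧ j < d.length then d.getD m 0 + v else d.getD m 0 := by
      by_cases hj : j = m
      · subst hj
        by_cases hl : j < d.length
        · simp [pvBump, List.getD_eq_getElem?_getD, hl]
        · have hset : d.set j (d.getD j 0 + v) = d := List.set_eq_of_length_le (by omega)
          simp [pvBump, hset, hl]
      · simp [pvBump, List.getD_eq_getElem?_getD, hj]
    rw [hget]
    generalize d.getD m 0 = z
    generalize pvS d m = y
    (try split_ifs) <;> omega

theorem pvS_apply (dd : PySem.Dict Int Int) (thr lo hi : Int) (hlh : lo ≤ hi)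
    (d : List Int) (hd : d.length = (hi - lo + 1).toNat + 1)
    (i : Nat) (hin : i < (hi - lo + 1).toNat) (p : Int × Int) :
    pvS (pvApply dd thr lo hi d p) (i + 1) =
      pvS d (i + 1) + (match dd.get? p.1 with
        | none   => if p.2 + thr ≤ lo + (i : Int) then (1 : Int) else 0
        | some e => if p.2 + thr ≤ lo + (i : Int) ∧ lo + (i : Int) ≤ e then (1 : Int) else 0) := by
  rcases h : dd.get? p.1 with _ | e <;>
    simp only [pvApply, h] <;>
    simp only [max_def, min_def] <;>
    split_ifs <;>
    (try rw [pvS_bump, pvS_bump]) <;>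
    (try simp only [pvBump, List.length_set]) <;>
    generalize pvS d (i + 1) = x <;>
    (try split_ifs) <;> omega

theorem pvS_delta (dd : PySem.Dict Int Int) (thr lo hi : Int) (hlh : lo ≤ hi)
    (units : List (Int × Int)) (d : List Int) (hd : d.length = (hi - lo + 1).toNat + 1)
    (i : Nat) (hin : i < (hi - lo + 1).toNat) :
    pvS (units.foldl (pvApply dd thr lo hi) d) (i + 1) =
      pvS d (i + 1) + pvCnt dd thr units (lo + (i : Int)) 0 := by
  induction units generalizing d with
  | nil => simp [pvCnt]
  | cons u us ih =>
    have hlen : (pvApply dd thr lo hi d u).length = (hi - lo + 1).toNat + 1 := by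
      simp only [pvApply, pvBump]
      split_ifs <;> simp [hd]
    rw [List.foldl_cons, ih _ hlen, pvS_apply dd thr lo hi hlh d hd i hin u, pvCnt_cons]
    rcases h : dd.get? u.1 with _ | e <;> simp only [h] <;> split_ifs <;> norm_num <;>
      linarith [pvCnt_shift dd thr us (lo + (i : Int)) 1]

theorem pvS_replicate (m k : Nat) : pvS (List.replicate m (0 : Int)) k = 0 := by
  induction k with
  | zero => simp [pvS]
  | succ k ih =>
    rw [pvS_succ, ih]
    rcases Nat.lt_or_ge k m with h | h <;>
      simp [List.getD_eq_getElem?_getD, h]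

-- B's second loop builds the items list directly
theorem pvB_loop (delta : List Int) (lo : Int) (n : Nat) :
    ((List.range n).foldl
      (fun (st : PySem.Dict Int Int × Int) i =>
        let c := st.2 + delta.getD i 0
        (st.1.insert (lo + (i : Int)) c, c))
      (PySem.Dict.empty, 0)) =
    (PySem.Dict.mk ((List.range n).map (fun (i : Nat) => (lo + (i : Int), pvS delta (i + 1)))), pvS delta n) := by
  induction n with
  | zero => simp [pvS]; rfl
  | succ n ih =>
    rw [List.range_succ, List.foldl_append, ih, List.foldl_cons, List.foldl_nil]
    have hnc : (PySem.Dict.mk ((List.range n).map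
        (fun (i : Nat) => (lo + (i : Int), pvS delta (i + 1))))).contains (lo + (n : Int)) = false := by
      simp [PySem.Dict.contains_mk]
      intro i hi
      omega
    have hins := PySem.Dict.items_insert_of_not_contains
      (d := PySem.Dict.mk ((List.range n).map (fun (i : Nat) => (lo + (i : Int), pvS delta (i + 1)))))
      (k := lo + (n : Int)) (v := pvS delta n + delta.getD n 0) hnc
    refine Prod.ext ?_ ?_
    · apply PySem.Dict.ext
      simp only []
      rw [hins]
      simp [pvS_succ]
    · simp [pvS_succ]

theorem pvMain (born_dict died_dict : List (Int × Int)) (s e thr : Int) :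
    calculate_idle_larva_counts born_dict died_dict s e thr
      = calculate_idle_larva_counts_alt born_dict died_dict s e thr := by
  unfold calculate_idle_larva_counts calculate_idle_larva_counts_alt
  show ((PySem.List.pyRange s
        (min e (PySem.List.maxD (PySem.Dict.ofList died_dict).values (fun v => v) 0) + 1) 1).foldl
      (fun (acc : PySem.Dict Int Int) current_time =>
        acc.insert current_time
          (pvCnt (PySem.Dict.ofList died_dict) thr (PySem.Dict.ofList born_dict).items current_time 0))
      PySem.Dict.empty).items =
    (if s > min e (PySem.List.maxD (PySem.Dict.ofList died_dict).values (fun v => v) 0) then []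
     else
      (((List.range ((min e (PySem.List.maxD (PySem.Dict.ofList died_dict).values (fun v => v) 0) - s + 1).toNat)).foldl
        (fun (st : PySem.Dict Int Int × Int) i =>
          let c := st.2 +
            ((PySem.Dict.ofList born_dict).items.foldl
              (pvApply (PySem.Dict.ofList died_dict) thr s
                (min e (PySem.List.maxD (PySem.Dict.ofList died_dict).values (fun v => v) 0)))
              (List.replicate ((min e (PySem.List.maxD (PySem.Dict.ofList died_dict).values (fun v => v) 0) - s + 1).toNat + 1) 0)).getD i 0
          (st.1.insert (s + (i : Int)) c, c))
        (PySem.Dict.empty, (0 : Int))).1).items)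
  set dd := PySem.Dict.ofList died_dict with hdd
  set bd := PySem.Dict.ofList born_dict with hbd
  set hi := min e (PySem.List.maxD dd.values (fun v => v) 0) with hhi
  by_cases hgt : s > hi
  · rw [if_pos hgt, PySem.List.pyRange_one_eq_nil (by omega)]
    simp [PySem.Dict.empty, PySem.Dict.items]
  · rw [if_neg hgt]
    rw [not_lt] at hgt
    rw [PySem.Dict.items_foldl_insert_fresh _ (fun (t : Int) => t)
          (fun t => pvCnt dd thr bd.items t 0) PySem.Dict.empty
          (by intro a _; exact PySem.Dict.contains_empty a)
          (by simpa using PySem.List.nodup_pyRange_one s (hi + 1)),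
        pvB_loop]
    rw [PySem.List.pyRange_one]
    have hm : hi + 1 - s = hi - s + 1 := by ring
    rw [hm, List.map_map]
    apply List.map_congr_left
    intro k hk
    simp only [Function.comp]
    have hk' : k < (hi - s + 1).toNat := List.mem_range.mp hk
    have := pvS_delta dd thr s hi hgt bd.items
      (List.replicate ((hi - s + 1).toNat + 1) 0) (by simp) k hk'
    rw [pvS_replicate] at this
    simp only [zero_add] at this
    rw [this]

theorem calculate_idle_larva_counts_spec : Claim_equal_calculate_idle_larva_counts := by
  intro born_dict died_dict start_second end_second idle_threshold _
  unfold Spec_calculate_idle_larva_counts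
  exact pvMain born_dict died_dict start_second end_second idle_threshold
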